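-- pv_equiv track=rewrite | github.com/klei22/nanoGPT | analysis/min_prime_overlap/min_overlap_primes.py | int_nth_root_ceil
-- ===== SOURCE A (Python) =====
-- def int_nth_root_ceil(a: int, n: int) -> int:
--     """Smallest integer x such that x**n >= a (a>=0, n>=1)."""
--     if n < 1:
--         raise ValueError("n must be >= 1")
--     if a <= 1:
--         return 1
--
--     lo, hi = 1, 2
--     while pow(hi, n) < a:
--         hi *= 2
--
--     while lo + 1 < hi:
--         mid = (lo + hi) // 2
--         if pow(mid, n) >= a:
--             hi = mid
--         else:
--             lo = mid
--     return hi
-- ===== SOURCE B (Python) =====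
-- def int_nth_root_ceil(a: int, n: int) -> int:
--     """Smallest integer x such that x**n >= a (a>=0, n>=1)."""
--     if n < 1:
--         raise ValueError("n must be >= 1")
--     if a <= 1:
--         return 1
--     # Newton's method for the floor n-th root, started above the root.
--     x = 1 << -(-a.bit_length() // n)  # 2**ceil(bitlen/n) > a**(1/n)
--     while True:
--         y = ((n - 1) * x + a // x ** (n - 1)) // n
--         if y >= x:
--             break
--         x = y
--     # x == floor(a**(1/n)); take the ceiling.
--     return x if x ** n >= a else x + 1
-- ===== Notes on version B (the rewrite author's own statement) =====
-- stated objective: alternative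
-- what changed: Replaces A's exponential-bracketing-plus-binary-search with Newton's integer iteration for the floor n-th root (started from a bit-length-based over-estimate) followed by a ceiling adjustment.
import Mathlib
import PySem

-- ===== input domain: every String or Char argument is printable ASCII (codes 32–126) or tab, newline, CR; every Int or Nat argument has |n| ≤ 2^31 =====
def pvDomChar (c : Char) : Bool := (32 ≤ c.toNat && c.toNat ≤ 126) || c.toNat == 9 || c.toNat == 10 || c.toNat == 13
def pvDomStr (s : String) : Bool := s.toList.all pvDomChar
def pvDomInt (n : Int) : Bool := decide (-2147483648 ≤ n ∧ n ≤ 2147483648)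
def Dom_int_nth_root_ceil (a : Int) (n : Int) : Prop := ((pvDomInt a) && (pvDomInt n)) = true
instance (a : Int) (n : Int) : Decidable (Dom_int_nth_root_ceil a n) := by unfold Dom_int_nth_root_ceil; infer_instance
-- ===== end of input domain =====

-- B replaces A's exponential bracketing + binary search by Newton's integer iteration for the
-- floor n-th root plus a ceiling adjustment (objective: alternative algorithm, similar cost).

-- ===== PORT A =====

/-- Python `pow(b, e)`; exact for `0 ≤ e` (every call site below runs under the `n ≥ 1` guard). -/
def ipow (b e : Int) : Int := b ^ e.toNat

/-- `while pow(hi, n) < a: hi *= 2` — fuel bounds the iteration count (proven sufficient below). -/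
def growHi (a n : Int) : Nat → Int → Int
  | 0, hi => hi
  | fuel+1, hi => if ipow hi n < a then growHi a n fuel (hi * 2) else hi

/-- `while lo + 1 < hi: mid = (lo + hi) // 2; ...` — fuel bounds the iteration count. -/
def bsearchA (a n : Int) : Nat → Int → Int → Int
  | 0, _, hi => hi
  | fuel+1, lo, hi =>
    if lo + 1 < hi then
      let mid := PySem.Int.floordiv (lo + hi) 2
      if a ≤ ipow mid n then bsearchA a n fuel lo mid else bsearchA a n fuel mid hi
    else hi

def int_nth_root_ceil (a : Int) (n : Int) : Int :=
  if n < 1 then 0  -- Python raises ValueError here (excluded by Pre_)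
  else if a ≤ 1 then 1
  else
    let hi := growHi a n a.toNat 2
    bsearchA a n (hi - 1).toNat 1 hi

-- ===== PORT B =====

/-- `y = ((n - 1) * x + a // x ** (n - 1)) // n` -/
def newtonStep (a n x : Int) : Int :=
  PySem.Int.floordiv ((n - 1) * x + PySem.Int.floordiv a (ipow x (n - 1))) n

/-- `while True: y = ...; if y >= x: break; x = y` — fuel bounds the iteration count. -/
def newtonLoop (a n : Int) : Nat → Int → Int
  | 0, x => x
  | fuel+1, x =>
    let y := newtonStep a n x
    if y < x then newtonLoop a n fuel y else x

def int_nth_root_ceil_alt (a : Int) (n : Int) : Int :=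
  if n < 1 then 0  -- Python raises ValueError here (excluded by Pre_)
  else if a ≤ 1 then 1
  else
    let k := -(PySem.Int.floordiv (-(PySem.Int.bitLength a : Int)) n)  -- -(-a.bit_length() // n)
    let x0 : Int := 2 ^ k.toNat  -- 1 << k  (k ≥ 1 whenever a ≥ 2 and n ≥ 1)
    let x := newtonLoop a n x0.toNat x0
    if a ≤ ipow x n then x else x + 1

-- ===== PRECONDITION & SPEC =====
-- Python A raises ValueError exactly when n < 1; it returns on every other input.
def Pre_int_nth_root_ceil (a : Int) (n : Int) : Prop := 1 ≤ n
instance (a : Int) (n : Int) : Decidable (Pre_int_nth_root_ceil a n) := by unfold Pre_int_nth_root_ceil; infer_instance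
def pvWitness_int_nth_root_ceil : Int × Int := (10, 3)

def Spec_int_nth_root_ceil (a : Int) (n : Int) (out : Int) : Prop := out = int_nth_root_ceil_alt a n
instance (a : Int) (n : Int) (out : Int) : Decidable (Spec_int_nth_root_ceil a n out) := by unfold Spec_int_nth_root_ceil; infer_instance

-- ===== CLAIM (what is proved, stated in full; the proofs are below) =====
def Claim_equal_int_nth_root_ceil : Prop := ∀ (a : Int) (n : Int), Dom_int_nth_root_ceil a n → Pre_int_nth_root_ceil a n → Spec_int_nth_root_ceil a n (int_nth_root_ceil a n)

-- ===== LEMMAS AND PROOFS =====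

/-- The result both programs compute for `a ≥ 2`: the least `t ≥ 1` with `t^n ≥ a`. -/
def IsRoot (a n t : Int) : Prop := 1 ≤ t ∧ a ≤ t ^ n.toNat ∧ (t - 1) ^ n.toNat < a

theorem isRoot_unique {a n u v : Int} (hu : IsRoot a n u) (hv : IsRoot a n v) : u = v := by
  obtain ⟨hu1, hua, hub⟩ := hu
  obtain ⟨hv1, hva, hvb⟩ := hv
  rcases lt_trichotomy u v with h | h | h
  · exact absurd (lt_of_le_of_lt hua (lt_of_le_of_lt (pow_le_pow_left₀ (by omega) (by omega : u ≤ v - 1) _) hvb)) (lt_irrefl _)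
  · exact h
  · exact absurd (lt_of_le_of_lt hva (lt_of_le_of_lt (pow_le_pow_left₀ (by omega) (by omega : v ≤ u - 1) _) hub)) (lt_irrefl _)

-- integer AM-GM: (m+1)·s·x^m ≤ m·x^(m+1) + s^(m+1) for x ≥ 1, s ≥ 0
theorem amgm (m : ℕ) (x s : ℤ) (hx : 1 ≤ x) (hs : 0 ≤ s) :
    ((m : ℤ) + 1) * s * x ^ m ≤ (m : ℤ) * x ^ (m + 1) + s ^ (m + 1) := by
  induction m with
  | zero => simp
  | succ m ih =>
    have haux : s * x ^ (m + 1) + s ^ (m + 1) * x ≤ x ^ (m + 2) + s ^ (m + 2) := by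
      have e1 : x ^ (m + 2) = x ^ (m + 1) * x := pow_succ x (m+1)
      have e2 : s ^ (m + 2) = s ^ (m + 1) * s := pow_succ s (m+1)
      rcases le_total s x with h | h
      · have hp : s ^ (m + 1) ≤ x ^ (m + 1) := pow_le_pow_left₀ hs h _
        nlinarith [mul_nonneg (sub_nonneg.2 hp) (sub_nonneg.2 h)]
      · have hp : x ^ (m + 1) ≤ s ^ (m + 1) := pow_le_pow_left₀ (by omega) h _
        nlinarith [mul_nonneg (sub_nonneg.2 hp) (sub_nonneg.2 h)]
    have ihx := mul_le_mul_of_nonneg_right ih (by omega : (0:ℤ) ≤ x)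
    have e1 : x ^ (m + 1) * x = x ^ (m + 2) := (pow_succ x (m+1)).symm
    have e2 : x ^ m * x = x ^ (m + 1) := (pow_succ x m).symm
    have ihx' : ((m:ℤ) + 1) * s * x ^ (m + 1) ≤ (m:ℤ) * x ^ (m + 2) + s ^ (m + 1) * x := by
      calc ((m:ℤ) + 1) * s * x ^ (m + 1) = ((m:ℤ) + 1) * s * x ^ m * x := by rw [← e2]; ring
        _ ≤ ((m:ℤ) * x ^ (m + 1) + s ^ (m + 1)) * x := ihx
        _ = (m:ℤ) * (x ^ (m + 1) * x) + s ^ (m + 1) * x := by ring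
        _ = (m:ℤ) * x ^ (m + 2) + s ^ (m + 1) * x := by rw [e1]
    show ((m:ℤ) + 1 + 1) * s * x ^ (m + 1) ≤ ((m:ℤ) + 1) * x ^ (m + 2) + s ^ (m + 2)
    linarith [ihx', haux]

-- any s ≥ 0 with s^n ≤ a is a lower bound for a Newton step from x ≥ 1
theorem step_ge {a n x s : ℤ} (hn : 1 ≤ n) (hx : 1 ≤ x) (hs : 0 ≤ s)
    (hsa : s ^ n.toNat ≤ a) : s ≤ newtonStep a n x := by
  obtain ⟨p, hp⟩ : ∃ p, n.toNat = p + 1 := ⟨n.toNat - 1, by omega⟩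
  have hxp : (0:ℤ) < x ^ (n - 1).toNat := pow_pos (by omega) _
  have key : (s * n - (n - 1) * x) * x ^ (n - 1).toNat ≤ a := by
    have hcast : ((p : ℤ) + 1) = n := by
      have := Int.toNat_of_nonneg (by omega : (0:ℤ) ≤ n); omega
    have h1 : ((p : ℤ) + 1) * s * x ^ p ≤ (p : ℤ) * x ^ (p + 1) + s ^ (p + 1) := amgm p x s hx hs
    have e : (n - 1).toNat = p := by omega
    have e2 : x ^ (p + 1) = x ^ p * x := pow_succ x p
    rw [e]
    calc (s * n - (n - 1) * x) * x ^ p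
        = ((p : ℤ) + 1) * s * x ^ p - (p : ℤ) * (x ^ p * x) := by rw [← hcast]; ring
      _ ≤ s ^ (p + 1) := by rw [← e2]; linarith [h1]
      _ ≤ a := by rw [← hp] at *; exact hsa
  rw [newtonStep, PySem.Int.le_floordiv_iff_mul_le (by omega : (0:ℤ) < n)]
  have h2 : s * n - (n - 1) * x ≤ PySem.Int.floordiv a (ipow x (n - 1)) := by
    rw [ipow, PySem.Int.le_floordiv_iff_mul_le hxp]
    exact key
  linarith

-- when x overshoots (a < x^n) the Newton step strictly decreases
theorem step_lt {a n x : ℤ} (hn : 1 ≤ n) (hx : 1 ≤ x)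
    (ha : a < x ^ n.toNat) : newtonStep a n x < x := by
  have hxp : (0:ℤ) < x ^ (n - 1).toNat := pow_pos (by omega) _
  have hdiv : PySem.Int.floordiv a (ipow x (n - 1)) < x := by
    rw [ipow, PySem.Int.floordiv_lt_iff_lt_mul hxp]
    have e : n.toNat = (n - 1).toNat + 1 := by omega
    calc a < x ^ n.toNat := ha
      _ = x * x ^ (n - 1).toNat := by rw [e, pow_succ]; ring
  rw [newtonStep, PySem.Int.floordiv_lt_iff_lt_mul (by omega : (0:ℤ) < n)]
  nlinarith [hdiv]

theorem step_nonneg {a n x : ℤ} (hn : 1 ≤ n) (hx : 1 ≤ x) (ha0 : 0 ≤ a) :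
    0 ≤ newtonStep a n x := by
  have hxp : (0:ℤ) < x ^ (n - 1).toNat := pow_pos (by omega) _
  have hdiv : 0 ≤ PySem.Int.floordiv a (ipow x (n - 1)) := by
    rw [ipow, show (0:ℤ) = 0 by rfl, PySem.Int.le_floordiv_iff_mul_le hxp]; simpa using ha0
  rw [newtonStep, PySem.Int.le_floordiv_iff_mul_le (by omega : (0:ℤ) < n)]
  nlinarith [hdiv]

-- Newton loop invariant: x ≥ 1 and a < (x+1)^n; result is the floor n-th root
theorem newtonLoop_spec {a n : ℤ} (hn : 1 ≤ n) (ha : 2 ≤ a) :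
    ∀ (fuel : Nat) (x : ℤ), 1 ≤ x → a < (x + 1) ^ n.toNat → x.toNat ≤ fuel →
      1 ≤ newtonLoop a n fuel x ∧ (newtonLoop a n fuel x) ^ n.toNat ≤ a ∧
        a < (newtonLoop a n fuel x + 1) ^ n.toNat := by
  intro fuel
  induction fuel with
  | zero => intro x hx _ hf; omega
  | succ fuel ih =>
    intro x hx hinv hf
    rw [newtonLoop]
    set y := newtonStep a n x with hy
    have hy0 : 0 ≤ y := step_nonneg hn hx (by omega)
    by_cases hlt : y < x
    · -- invariant for y: a < (y+1)^n, else (y+1)^n ≤ a gives y+1 ≤ y via step_ge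
      have hyinv : a < (y + 1) ^ n.toNat := by
        by_contra hcon
        have := step_ge (a := a) (n := n) (x := x) (s := y + 1) hn hx (by omega) (by omega)
        omega
      have hy1 : 1 ≤ y := by
        by_contra hcon
        have hy0' : y = 0 := by omega
        rw [hy0'] at hyinv; simp at hyinv; omega
      simp only [hlt, if_pos]
      exact ih y hy1 hyinv (by omega)
    · -- loop ends: x^n ≤ a, else step_lt contradicts y ≥ x
      simp only [hlt, if_neg, not_false_iff]
      refine ⟨hx, ?_, hinv⟩
      by_contra hcon
      exact hlt (step_lt hn hx (by omega))

-- growHi returns hi ≥ 2 with a ≤ hi^n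
theorem growHi_spec {a n : ℤ} (hn : 1 ≤ n) :
    ∀ (fuel : Nat) (hi : ℤ), 2 ≤ hi → (a - hi).toNat < fuel →
      2 ≤ growHi a n fuel hi ∧ a ≤ (growHi a n fuel hi) ^ n.toNat := by
  intro fuel
  induction fuel with
  | zero => intro hi hhi hf; omega
  | succ fuel ih =>
    intro hi hhi hf
    rw [growHi]
    by_cases hlt : ipow hi n < a
    · have hle : hi ≤ hi ^ n.toNat := le_self_pow₀ (by omega) (by omega)
      have hia : hi < a := by rw [ipow] at hlt; omega
      simp only [hlt, if_pos]
      exact ih (hi * 2) (by omega) (by omega)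
    · simp only [hlt, if_neg, not_false_iff]
      rw [ipow] at hlt; exact ⟨hhi, by omega⟩

-- binary-search invariant: 1 ≤ lo < hi, lo^n < a ≤ hi^n; result is IsRoot
theorem bsearchA_spec {a n : ℤ} (_hn : 1 ≤ n) :
    ∀ (fuel : Nat) (lo hi : ℤ), 1 ≤ lo → lo < hi → lo ^ n.toNat < a → a ≤ hi ^ n.toNat →
      (hi - lo).toNat ≤ fuel + 1 → IsRoot a n (bsearchA a n fuel lo hi) := by
  intro fuel
  induction fuel with
  | zero =>
    intro lo hi hlo hlh hloa hhia hf
    have : hi = lo + 1 := by omega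
    rw [bsearchA]
    exact ⟨by omega, hhia, by rw [this]; simpa using hloa⟩
  | succ fuel ih =>
    intro lo hi hlo hlh hloa hhia hf
    rw [bsearchA]
    by_cases hg : lo + 1 < hi
    · simp only [hg, if_pos]
      have hmid : PySem.Int.floordiv (lo + hi) 2 = (lo + hi) / 2 :=
        PySem.Int.floordiv_eq_ediv_of_pos (by norm_num)
      set mid := PySem.Int.floordiv (lo + hi) 2 with hm
      have hb1 : lo < mid := by rw [hmid]; omega
      have hb2 : mid < hi := by rw [hmid]; omega
      by_cases hc : a ≤ ipow mid n
      · simp only [hc, if_pos]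
        exact ih lo mid hlo hb1 hloa (by rw [ipow] at hc; exact hc) (by omega)
      · simp only [hc, if_neg, not_false_iff]
        rw [ipow] at hc
        exact ih mid hi (by omega) hb2 (by omega) hhia (by omega)
    · simp only [hg, if_neg, not_false_iff]
      have : hi = lo + 1 := by omega
      exact ⟨by omega, hhia, by rw [this]; simpa using hloa⟩

-- A's result is the least t ≥ 1 with t^n ≥ a (for a ≥ 2, n ≥ 1)
theorem portA_isRoot {a n : ℤ} (hn : 1 ≤ n) (ha : 2 ≤ a) :
    IsRoot a n (int_nth_root_ceil a n) := by
  rw [int_nth_root_ceil]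
  simp only [show ¬ n < 1 by omega, if_neg, not_false_iff, show ¬ a ≤ 1 by omega]
  obtain ⟨hhi2, hhia⟩ := growHi_spec (a := a) hn a.toNat 2 (by omega) (by omega)
  exact bsearchA_spec hn _ 1 _ (by omega) (by omega) (by simpa using ha) hhia (by omega)

-- B's result likewise (for a ≥ 2, n ≥ 1)
theorem portB_isRoot {a n : ℤ} (hn : 1 ≤ n) (ha : 2 ≤ a) :
    IsRoot a n (int_nth_root_ceil_alt a n) := by
  rw [int_nth_root_ceil_alt]
  simp only [show ¬ n < 1 by omega, if_neg, not_false_iff, show ¬ a ≤ 1 by omega]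
  set L : ℕ := PySem.Int.bitLength a with hL
  set k : ℤ := -(PySem.Int.floordiv (-(L : ℤ)) n) with hk
  -- k·n ≥ L (ceiling division)
  have hdm := PySem.Int.floordiv_mul_add_mod (-(L : ℤ)) n
  have hm0 := PySem.Int.mod_nonneg (-(L : ℤ)) (by omega : (0:ℤ) < n)
  have hm1 := PySem.Int.mod_lt (-(L : ℤ)) (by omega : (0:ℤ) < n)
  have hkn : (L : ℤ) ≤ k * n := by rw [hk]; nlinarith
  have hL1 : 1 ≤ L := by
    rcases Nat.eq_zero_or_pos L with h0 | h
    · have h2 := PySem.Int.lt_two_pow_bitLength a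
      rw [← hL, h0, pow_zero, Nat.lt_one_iff] at h2
      omega
    · exact h
  have hk1 : 1 ≤ k := by
    by_contra hcon
    have hkn0 : k * n ≤ 0 := mul_nonpos_of_nonpos_of_nonneg (by omega) (by omega)
    have hL0 : (1:ℤ) ≤ (L:ℤ) := by exact_mod_cast hL1
    linarith
  set x0 : ℤ := 2 ^ k.toNat with hx0
  have hx01 : 1 ≤ x0 := one_le_pow₀ (by norm_num)
  -- a < x0^n  (since a < 2^L ≤ 2^(k·n) = x0^n)
  have hax0 : a < x0 ^ n.toNat := by
    have h2 := PySem.Int.lt_two_pow_bitLength a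
    rw [← hL] at h2
    have haL : a < ((2 : ℕ) ^ L : ℕ) := by
      have : a = (a.natAbs : ℤ) := by omega
      rw [this]; exact_mod_cast h2
    have hLe : L ≤ k.toNat * n.toNat := by
      have hcast : ((k.toNat * n.toNat : ℕ) : ℤ) = k * n := by
        push_cast [Int.toNat_of_nonneg (by omega : (0:ℤ) ≤ k), Int.toNat_of_nonneg (by omega : (0:ℤ) ≤ n)]
        ring
      have : (L : ℤ) ≤ ((k.toNat * n.toNat : ℕ) : ℤ) := by rw [hcast]; exact hkn
      exact_mod_cast this
    calc a < ((2 : ℕ) ^ L : ℕ) := haL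
      _ ≤ (((2 : ℕ) ^ (k.toNat * n.toNat) : ℕ) : ℤ) := by
          exact_mod_cast Nat.pow_le_pow_right (by norm_num) hLe
      _ = x0 ^ n.toNat := by rw [hx0]; push_cast [pow_mul]; ring
  have hinv : a < (x0 + 1) ^ n.toNat :=
    lt_of_lt_of_le hax0 (pow_le_pow_left₀ (by omega) (by omega) _)
  obtain ⟨hr1, hra, hrb⟩ := newtonLoop_spec hn ha x0.toNat x0 hx01 hinv (le_refl _)
  set x := newtonLoop a n x0.toNat x0 with hx
  by_cases hc : a ≤ ipow x n
  · simp only [hc, if_pos]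
    rw [ipow] at hc
    refine ⟨hr1, hc, ?_⟩
    calc (x - 1) ^ n.toNat < x ^ n.toNat :=
          pow_lt_pow_left₀ (by omega) (by omega) (by omega)
      _ ≤ a := hra
  · simp only [hc, if_neg, not_false_iff]
    rw [ipow] at hc
    exact ⟨by omega, le_of_lt hrb, by simpa using lt_of_not_ge hc⟩

-- ===== VERDICT (by name: the statement is the Claim_ definition above) =====
theorem int_nth_root_ceil_spec : Claim_equal_int_nth_root_ceil := by
  intro a n _ hpre
  unfold Spec_int_nth_root_ceil
  unfold Pre_int_nth_root_ceil at hpre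
  by_cases ha : a ≤ 1
  · simp [int_nth_root_ceil, int_nth_root_ceil_alt, show ¬ n < 1 by omega, ha]
  · exact isRoot_unique (portA_isRoot hpre (by omega)) (portB_isRoot hpre (by omega))
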